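-- pv_equiv track=rewrite | github.com/Lukasz-G/PAN2018_AuthorshipAttribution | utils.py | set_sizes
-- ===== SOURCE A (Python) =====
-- def strange(gen):
--     for thing in gen:
--         yield thing
--
-- def set_sizes(problem_collection):
--
--     nb_position=0
--     list_of_all = []
--     list_of_knows= []
--     list_of_knows_names= []
--     list_of_unknows= []
--     for nb1, (author, texts) in strange(enumerate(problem_collection.items())):
--         #break
--         for nb2, (text_name, op) in strange(enumerate(texts.items())):
--
--             del op
--             if author != 'unknown':
--                 list_of_knows.append(nb_position)
--                 list_of_all.append(author)
--                 list_of_knows_names.append(author)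
--                 #nb_position += 1
--             else:
--                 if True:#for pair in truths_for_problem["ground_truth"]:
--                     if  True:#pair['unknown-text']==text_name:
--                         list_of_unknows.append(text_name)
--                         list_of_all.append(text_name)
--             nb_position += 1
--
--             del text_name
--         del author
--
--
--     l1,l2 = len(list_of_knows), len(list_of_unknows)
--
--     del problem_collection, list_of_knows, list_of_unknows, list_of_all
--     #gc.collect()
--
--     return l1, l2
-- ===== SOURCE B (Python) =====
-- def set_sizes(problem_collection):
--     l1 = sum(len(texts.items()) for author, texts in problem_collection.items() if author != 'unknown')
--     l2 = sum(len(texts.items()) for author, texts in problem_collection.items() if author == 'unknown')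
--     return l1, l2
-- ===== Notes on version B (the rewrite author's own statement) =====
-- stated objective: simpler
-- what changed: Replaces the nested per-text loop with four accumulator lists and a running position counter by two direct sums of len(texts.items()) over the authors, filtered on the 'unknown' key.
import Mathlib
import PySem

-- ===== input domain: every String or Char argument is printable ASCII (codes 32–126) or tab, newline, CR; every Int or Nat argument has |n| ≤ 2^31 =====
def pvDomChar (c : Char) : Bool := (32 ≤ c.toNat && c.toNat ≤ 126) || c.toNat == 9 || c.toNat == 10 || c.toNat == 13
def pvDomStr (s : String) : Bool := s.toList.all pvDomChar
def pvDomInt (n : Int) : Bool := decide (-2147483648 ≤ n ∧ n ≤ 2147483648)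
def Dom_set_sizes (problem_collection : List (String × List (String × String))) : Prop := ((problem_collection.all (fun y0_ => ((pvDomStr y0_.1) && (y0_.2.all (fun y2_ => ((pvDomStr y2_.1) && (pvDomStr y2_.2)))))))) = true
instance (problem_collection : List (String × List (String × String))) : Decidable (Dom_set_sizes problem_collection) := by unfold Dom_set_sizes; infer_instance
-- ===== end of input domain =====

-- B replaces A's nested per-text loop, four accumulator lists and position counter
-- by two direct filtered sums of the per-author text counts (objective: simpler).

-- ===== PORT A =====
-- state = (nb_position, list_of_all, list_of_knows, list_of_knows_names, list_of_unknows)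
def set_sizes_inner (author : String)
    (st : Int × List String × List Int × List String × List String)
    (q : Int × String × String) :
    Int × List String × List Int × List String × List String :=
  let text_name := q.2.1
  let nb_position := st.1
  if author ≠ "unknown" then
    (nb_position + 1, st.2.1 ++ [author], st.2.2.1 ++ [nb_position],
     st.2.2.2.1 ++ [author], st.2.2.2.2)
  else
    (nb_position + 1, st.2.1 ++ [text_name], st.2.2.1,
     st.2.2.2.1, st.2.2.2.2 ++ [text_name])

def set_sizes (problem_collection : List (String × List (String × String))) : Int × Int :=
  let st :=
    (PySem.List.enumerate problem_collection).foldl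
      (fun st p =>
        let author := p.2.1
        let texts := p.2.2
        (PySem.List.enumerate texts).foldl (set_sizes_inner author) st)
      ((0 : Int), ([] : List String), ([] : List Int), ([] : List String), ([] : List String))
  ((st.2.2.1.length : Int), (st.2.2.2.2.length : Int))

-- ===== PORT B =====
def set_sizes_alt (problem_collection : List (String × List (String × String))) : Int × Int :=
  let l1 := ((problem_collection.filter (fun p => p.1 ≠ "unknown")).map
              (fun p => (p.2.length : Int))).sum
  let l2 := ((problem_collection.filter (fun p => p.1 = "unknown")).map
              (fun p => (p.2.length : Int))).sum
  (l1, l2)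

-- ===== PRECONDITION & SPEC =====
def Spec_set_sizes (problem_collection : List (String × List (String × String))) (out : Int × Int) : Prop := out = set_sizes_alt problem_collection
instance (problem_collection : List (String × List (String × String))) (out : Int × Int) : Decidable (Spec_set_sizes problem_collection out) := by unfold Spec_set_sizes; infer_instance

-- ===== CLAIM (what is proved, stated in full; the proofs are below) =====
def Claim_equal_set_sizes : Prop := ∀ (problem_collection : List (String × List (String × String))), Dom_set_sizes problem_collection → Spec_set_sizes problem_collection (set_sizes problem_collection)

-- ===== LEMMAS AND PROOFS =====

-- folding the inner step over the enumeration ignores the index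
theorem inner_fold_eq (author : String) (texts : List (String × String)) (s : Int)
    (st : Int × List String × List Int × List String × List String) :
    (PySem.List.enumerate texts s).foldl (set_sizes_inner author) st
      = texts.foldl (fun st q => set_sizes_inner author st (0, q)) st := by
  induction texts generalizing s st with
  | nil => rfl
  | cons t ts ih => simp [PySem.List.enumerate_cons, List.foldl_cons, ih, set_sizes_inner]

-- lengths of the knows / unknows accumulators after the inner loop
theorem inner_lengths (author : String) (texts : List (String × String))
    (st : Int × List String × List Int × List String × List String) :
    (texts.foldl (fun st q => set_sizes_inner author st (0, q)) st).2.2.1.length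
      = st.2.2.1.length + (if author ≠ "unknown" then texts.length else 0) ∧
    (texts.foldl (fun st q => set_sizes_inner author st (0, q)) st).2.2.2.2.length
      = st.2.2.2.2.length + (if author = "unknown" then texts.length else 0) := by
  induction texts generalizing st with
  | nil => simp
  | cons t ts ih =>
    by_cases h : author = "unknown" <;>
      simpa [set_sizes_inner, h, Nat.add_comm, Nat.add_assoc, Nat.add_left_comm] using
        ih (set_sizes_inner author st (0, t))

theorem outer_lengths (pc : List (String × List (String × String))) (s : Int)
    (st : Int × List String × List Int × List String × List String) :
    (((PySem.List.enumerate pc s).foldl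
        (fun st p => (PySem.List.enumerate p.2.2).foldl (set_sizes_inner p.2.1) st) st).2.2.1.length : Int)
      = st.2.2.1.length + ((pc.filter (fun p => p.1 ≠ "unknown")).map (fun p => (p.2.length : Int))).sum ∧
    (((PySem.List.enumerate pc s).foldl
        (fun st p => (PySem.List.enumerate p.2.2).foldl (set_sizes_inner p.2.1) st) st).2.2.2.2.length : Int)
      = st.2.2.2.2.length + ((pc.filter (fun p => p.1 = "unknown")).map (fun p => (p.2.length : Int))).sum := by
  induction pc generalizing s st with
  | nil => simp
  | cons x xs ih =>
    simp only [PySem.List.enumerate_cons, List.foldl_cons, inner_fold_eq]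
    have ih' := ih (s + 1) (x.2.foldl (fun st q => set_sizes_inner x.1 st (0, q)) st)
    simp only [inner_fold_eq] at ih'
    obtain ⟨ih1, ih2⟩ := ih'
    have h1 := (inner_lengths x.1 x.2 st).1
    have h2 := (inner_lengths x.1 x.2 st).2
    refine ⟨?_, ?_⟩
    · rw [ih1, h1]
      by_cases h : x.1 = "unknown" <;> simp [h] <;> ring
    · rw [ih2, h2]
      by_cases h : x.1 = "unknown" <;> simp [h] <;> ring

-- ===== VERDICT (by name: the statement is the Claim_ definition above) =====
theorem set_sizes_spec : Claim_equal_set_sizes := by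
  intro pc _
  unfold Spec_set_sizes set_sizes set_sizes_alt
  obtain ⟨h1, h2⟩ := outer_lengths pc 0 ((0 : Int), [], [], [], [])
  simp only at h1 h2
  simp [h1, h2]
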